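-- pv_equiv track=rewrite | github.com/jackmen-258/dhoi | data/text_generator.py | _group_by_slot
-- ===== SOURCE A (Python) =====
-- def _group_by_slot(contacts):
--     """
--     按 slot 分组 → {slot: [hand_parts]}
--     只关心哪些手指接触了哪个部件
--     """
--     slot_data = {}
--     for hp, sl in contacts:
--         if sl not in slot_data:
--             slot_data[sl] = []
--         if hp not in slot_data[sl]:
--             slot_data[sl].append(hp)
--     return slot_data
-- ===== SOURCE B (Python) =====
-- def _group_by_slot(contacts):
--     # Slot-major: list the distinct slots in first-appearance order, then for
--     # each slot scan the whole contact list, keeping a contact's hand_part only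
--     # at the first occurrence of that exact contact pair.
--     slots = list(dict.fromkeys(sl for _, sl in contacts))
--     return {sl: [c[0] for i, c in enumerate(contacts)
--                  if c[1] == sl and c not in contacts[:i]]
--             for sl in slots}
-- ===== Notes on version B (the rewrite author's own statement) =====
-- stated objective: alternative
-- what changed: A is contact-major: one loop over contacts maintaining a dict and testing list membership per contact; B is slot-major: it first computes the distinct slots in first-appearance order, then builds each slot's list by a separate full scan of the contacts keeping only the first occurrence of each exact pair, with no dict mutation at all.
import Mathlib
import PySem

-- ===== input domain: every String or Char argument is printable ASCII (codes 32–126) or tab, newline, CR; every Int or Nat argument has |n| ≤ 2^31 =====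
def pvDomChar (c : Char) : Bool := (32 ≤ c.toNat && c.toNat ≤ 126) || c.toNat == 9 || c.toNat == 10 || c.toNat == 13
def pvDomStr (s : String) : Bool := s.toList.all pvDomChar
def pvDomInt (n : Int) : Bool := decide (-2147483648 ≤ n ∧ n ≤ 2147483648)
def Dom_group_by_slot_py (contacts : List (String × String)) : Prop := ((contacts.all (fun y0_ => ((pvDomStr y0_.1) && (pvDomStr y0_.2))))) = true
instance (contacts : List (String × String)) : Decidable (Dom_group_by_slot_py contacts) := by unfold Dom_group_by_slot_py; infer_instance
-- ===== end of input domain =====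

-- B replaces A's contact-major dict-building loop by a slot-major nested scan:
-- distinct slots first, then per slot a scan keeping first occurrences of each pair.

-- ===== PORT A =====
-- one loop: ensure the slot key exists, then append hp if not already present
def group_by_slot_py (contacts : List (String × String)) : List (String × List String) :=
  (contacts.foldl
    (fun slot_data p =>
      let slot_data :=
        if slot_data.contains p.2 = false then slot_data.insert p.2 ([] : List String)
        else slot_data
      if p.1 ∈ slot_data.getD p.2 [] then slot_data
      else slot_data.insert p.2 (slot_data.getD p.2 [] ++ [p.1]))
    PySem.Dict.empty).items

-- ===== PORT B =====
-- [c[0] for i, c in enumerate(contacts) if c[1] == sl and c not in contacts[:i]]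
def pvVal (contacts : List (String × String)) (sl : String) : List String :=
  (((PySem.List.enumerate contacts 0).filter
      (fun ic => ic.2.2 == sl && !((PySem.List.slice contacts none (some ic.1)).contains ic.2))).map
    (fun ic => ic.2.1))

-- slots = list(dict.fromkeys(sl for _, sl in contacts)); then the dict comprehension
def group_by_slot_py_alt (contacts : List (String × String)) : List (String × List String) :=
  let slots := PySem.List.dedup (contacts.map (fun c => c.2))
  slots.map (fun sl => (sl, pvVal contacts sl))

-- ===== PRECONDITION & SPEC =====
def Spec_group_by_slot_py (contacts : List (String × String)) (out : List (String × List String)) : Prop := out = group_by_slot_py_alt contacts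
instance (contacts : List (String × String)) (out : List (String × List String)) : Decidable (Spec_group_by_slot_py contacts out) := by unfold Spec_group_by_slot_py; infer_instance

-- ===== CLAIM (what is proved, stated in full; the proofs are below) =====
def Claim_equal_group_by_slot_py : Prop := ∀ (contacts : List (String × String)), Dom_group_by_slot_py contacts → Spec_group_by_slot_py contacts (group_by_slot_py contacts)

-- ===== LEMMAS AND PROOFS =====

-- pvVal over a snoc: the new contact contributes its hand_part exactly when its
-- slot matches and the pair is new
theorem pvVal_append (l : List (String × String)) (c : String × String) (s : String) :
    pvVal (l ++ [c]) s
      = pvVal l s ++ (if s = c.2 ∧ c ∉ l then [c.1] else []) := by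
  unfold pvVal
  rw [PySem.List.enumerate_append, List.filter_append, List.map_append]
  congr 1
  · apply congrArg
    apply List.filter_congr
    intro ic hic
    obtain ⟨k, hk, rfl⟩ := (PySem.List.mem_enumerate_iff _ _ _).mp hic
    have h1 : PySem.List.slice (l ++ [c]) none (some ((0 : Int) + (k : Int)))
        = PySem.List.slice l none (some ((0 : Int) + (k : Int))) := by
      have hz : ((0 : Int) + (k : Int)) = ((k : Nat) : Int) := by ring
      rw [hz, PySem.List.slice_to_natCast, PySem.List.slice_to_natCast,
          List.take_append_of_le_length (le_of_lt hk)]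
    rw [h1]
  · simp only [PySem.List.enumerate_cons, PySem.List.enumerate_nil]
    have hz : ((0 : Int) + (l.length : Int)) = ((l.length : Nat) : Int) := by ring
    have hslice : PySem.List.slice (l ++ [c]) none (some ((0 : Int) + (l.length : Int))) = l := by
      rw [hz, PySem.List.slice_to_natCast, List.take_left]
    by_cases h1 : s = c.2
    · subst h1
      by_cases h2 : c ∈ l <;> simp [h2]
    · by_cases h2 : c ∈ l <;> simp [h1, Ne.symm h1, h2]

theorem pvVal_nil (s : String) : pvVal [] s = [] := rfl

theorem mem_pvVal (l : List (String × String)) (s x : String) :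
    x ∈ pvVal l s ↔ (x, s) ∈ l := by
  induction l using List.reverseRecOn with
  | nil => simp [pvVal_nil]
  | append_singleton l c ih =>
    rw [pvVal_append]
    simp only [List.mem_append, List.mem_singleton, ih]
    split_ifs with h
    · obtain ⟨h1, _⟩ := h
      subst h1
      simp [Prod.ext_iff]
    · have h' : s = c.2 → c ∈ l := fun hs => not_not.mp (fun hn => h ⟨hs, hn⟩)
      simp only [List.not_mem_nil, or_false]
      constructor
      · exact Or.inl
      · rintro (hl | hec)
        · exact hl
        · have hs : s = c.2 := congrArg Prod.snd hec
          have hcl : c ∈ l := h' hs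
          exact hec ▸ hcl

theorem pvVal_of_not_mem (l : List (String × String)) (s : String)
    (h : s ∉ l.map (fun c => c.2)) : pvVal l s = [] := by
  unfold pvVal
  rw [List.map_eq_nil_iff, List.filter_eq_nil_iff]
  intro ic hic
  obtain ⟨k, hk, rfl⟩ := (PySem.List.mem_enumerate_iff _ _ _).mp hic
  have hmem : l[k].2 ∈ l.map (fun c => c.2) := List.mem_map_of_mem (l.getElem_mem hk)
  have hne : ¬ (l[k].2 = s) := fun he => h (he ▸ hmem)
  simp [hne]

-- keys of the explicit dict are exactly the dedup'd slots
theorem pvKeys (l : List (String × String)) :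
    (PySem.Dict.mk ((PySem.List.dedup (l.map (fun x => x.2))).map
        (fun s => (s, pvVal l s)))).keys = PySem.List.dedup (l.map (fun x => x.2)) := by
  simp only [PySem.Dict.keys, List.map_map]
  exact List.map_id _

-- A's loop body, written out without the let (definitionally equal to it)
def pvStep (d : PySem.Dict String (List String)) (p : String × String) :
    PySem.Dict String (List String) :=
  if p.1 ∈ (if d.contains p.2 = false then d.insert p.2 ([] : List String) else d).getD p.2 []
  then (if d.contains p.2 = false then d.insert p.2 ([] : List String) else d)
  else (if d.contains p.2 = false then d.insert p.2 ([] : List String) else d).insert p.2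
         ((if d.contains p.2 = false then d.insert p.2 ([] : List String) else d).getD p.2 []
           ++ [p.1])

-- one step of A's loop on the explicit dict
theorem step_eq (l : List (String × String)) (c : String × String) :
    pvStep (PySem.Dict.mk ((PySem.List.dedup (l.map (fun x => x.2))).map
        (fun s => (s, pvVal l s)))) c
    = PySem.Dict.mk ((PySem.List.dedup ((l ++ [c]).map (fun x => x.2))).map
        (fun s => (s, pvVal (l ++ [c]) s))) := by
  set sls := PySem.List.dedup (l.map (fun x => x.2)) with hsls
  have hkeys : (PySem.Dict.mk (sls.map (fun s => (s, pvVal l s)))).keys = sls := by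
    rw [hsls]; exact pvKeys l
  have hndk : (PySem.Dict.mk (sls.map (fun s => (s, pvVal l s)))).keys.Nodup := by
    rw [hkeys, hsls]; exact PySem.List.nodup_dedup _
  have hsls' : PySem.List.dedup ((l ++ [c]).map (fun x => x.2)) = PySem.Set.add sls c.2 := by
    rw [hsls]
    simp [List.map_append, PySem.Set.ofList_append_singleton]
  by_cases hm : c.2 ∈ l.map (fun x => x.2)
  · -- the slot already has a key
    have hmem_sls : c.2 ∈ sls := by rw [hsls]; exact (PySem.List.mem_dedup _ _).mpr hm
    have hc : (PySem.Dict.mk (sls.map (fun s => (s, pvVal l s)))).contains c.2 = true :=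
      (PySem.Dict.contains_iff_mem_keys _ _).mpr (by rw [hkeys]; exact hmem_sls)
    have hif : (if (PySem.Dict.mk (sls.map (fun s => (s, pvVal l s)))).contains c.2 = false
        then (PySem.Dict.mk (sls.map (fun s => (s, pvVal l s)))).insert c.2 ([] : List String)
        else PySem.Dict.mk (sls.map (fun s => (s, pvVal l s))))
        = PySem.Dict.mk (sls.map (fun s => (s, pvVal l s))) := if_neg (by simp [hc])
    have hitems : (c.2, pvVal l c.2)
        ∈ (PySem.Dict.mk (sls.map (fun s => (s, pvVal l s)))).items :=
      List.mem_map_of_mem hmem_sls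
    have hget : (PySem.Dict.mk (sls.map (fun s => (s, pvVal l s)))).get? c.2
        = some (pvVal l c.2) :=
      PySem.Dict.get?_of_mem_items _ (k := c.2) (v := pvVal l c.2) hitems hndk
    have hgd : (PySem.Dict.mk (sls.map (fun s => (s, pvVal l s)))).getD c.2 [] = pvVal l c.2 := by
      rw [PySem.Dict.getD_eq_get?_getD, hget]; rfl
    have haddsame : PySem.Set.add sls c.2 = sls := by
      simp [PySem.Set.add, hmem_sls]
    unfold pvStep
    rw [hif, hgd]
    by_cases hcl : c ∈ l
    · -- pair already recorded: dict unchanged; pvVal unchanged on every slot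
      have hin : c.1 ∈ pvVal l c.2 := (mem_pvVal l c.2 c.1).mpr (by simpa using hcl)
      rw [if_pos hin, hsls', haddsame]
      congr 1
      apply List.map_congr_left
      intro s _
      rw [pvVal_append, if_neg (by simp [hcl]), List.append_nil]
    · -- new pair for an existing slot: the slot's value gets c.1 appended
      have hnin : ¬ c.1 ∈ pvVal l c.2 :=
        fun h => hcl (by simpa using (mem_pvVal l c.2 c.1).mp h)
      rw [if_neg hnin]
      apply PySem.Dict.ext
      rw [PySem.Dict.items_insert_of_contains _ _ hc, hsls', haddsame]
      show ((sls.map (fun s => (s, pvVal l s))).map _ : List (String × List String)) = _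
      rw [List.map_map]
      apply List.map_congr_left
      intro s hs
      by_cases hseq : s = c.2
      · subst hseq
        simp only [Function.comp_apply, BEq.rfl, if_pos]
        rw [pvVal_append, if_pos ⟨rfl, hcl⟩]
      · simp only [Function.comp_apply]
        rw [if_neg (by simpa using hseq), pvVal_append, if_neg (by simp [hseq]),
            List.append_nil]
  · -- fresh slot: a new key with value [c.1] is appended at the end
    have hnmem_sls : c.2 ∉ sls := by rw [hsls, PySem.List.mem_dedup]; exact hm
    have hc : (PySem.Dict.mk (sls.map (fun s => (s, pvVal l s)))).contains c.2 = false := by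
      rw [← Bool.not_eq_true]
      intro hct
      have hmk := (PySem.Dict.contains_iff_mem_keys _ _).mp hct
      rw [hkeys] at hmk
      exact hnmem_sls hmk
    have hif : (if (PySem.Dict.mk (sls.map (fun s => (s, pvVal l s)))).contains c.2 = false
        then (PySem.Dict.mk (sls.map (fun s => (s, pvVal l s)))).insert c.2 ([] : List String)
        else PySem.Dict.mk (sls.map (fun s => (s, pvVal l s))))
        = (PySem.Dict.mk (sls.map (fun s => (s, pvVal l s)))).insert c.2 ([] : List String) :=
      if_pos hc
    have hgd : ((PySem.Dict.mk (sls.map (fun s => (s, pvVal l s)))).insert c.2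
        ([] : List String)).getD c.2 [] = [] := by
      rw [PySem.Dict.getD_insert_self]
    have hcl : c ∉ l := fun h => hm (List.mem_map_of_mem h)
    unfold pvStep
    rw [hif, hgd, if_neg (List.not_mem_nil), List.nil_append]
    apply PySem.Dict.ext
    rw [PySem.Dict.items_insert_of_contains _ _ (PySem.Dict.contains_insert_self _ c.2 _),
        PySem.Dict.items_insert_of_not_contains _ _ hc, hsls']
    have haddnew : PySem.Set.add sls c.2 = sls ++ [c.2] := by
      simp [PySem.Set.add, hnmem_sls]
    rw [haddnew]
    simp only [List.map_append]
    congr 1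
    · show ((sls.map (fun s => (s, pvVal l s))).map _ : List (String × List String)) = _
      rw [List.map_map]
      apply List.map_congr_left
      intro s hs
      have hne : s ≠ c.2 := fun h => hnmem_sls (h ▸ hs)
      simp only [Function.comp_apply]
      rw [if_neg (by simpa using hne), pvVal_append, if_neg (by simp [hne]),
          List.append_nil]
    · simp only [List.map_cons, List.map_nil, BEq.rfl, if_pos, List.cons.injEq, and_true,
        Prod.mk.injEq, true_and]
      rw [pvVal_append, if_pos ⟨rfl, hcl⟩, pvVal_of_not_mem l c.2 hm, List.nil_append]

-- the dict A maintains after processing l, as an explicit association list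
theorem loop_items (l : List (String × String)) :
    l.foldl
      (fun slot_data p =>
        let slot_data :=
          if slot_data.contains p.2 = false then slot_data.insert p.2 ([] : List String)
          else slot_data
        if p.1 ∈ slot_data.getD p.2 [] then slot_data
        else slot_data.insert p.2 (slot_data.getD p.2 [] ++ [p.1]))
      PySem.Dict.empty
    = PySem.Dict.mk ((PySem.List.dedup (l.map (fun c => c.2))).map (fun s => (s, pvVal l s))) := by
  induction l using List.reverseRecOn with
  | nil => rfl
  | append_singleton l c ih =>
    rw [List.foldl_append, ih, List.foldl_cons, List.foldl_nil]
    exact step_eq l c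

-- ===== VERDICT (by name: the statement is the Claim_ definition above) =====
theorem group_by_slot_py_spec : Claim_equal_group_by_slot_py := by
  intro contacts _
  show group_by_slot_py contacts = group_by_slot_py_alt contacts
  unfold group_by_slot_py group_by_slot_py_alt
  rw [loop_items]
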